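-- pv_equiv track=rewrite | github.com/ronsims2/report_engine | positions.py | get_chunk_indexes
-- ===== SOURCE A (Python) =====
-- def get_chunk_indexes(store_size, positions):
--     stores_chunks = []
--
--     chunk_count = len(positions)
--     chunk_size = int(store_size / chunk_count)
--
--     for i in range(chunk_count):
--         start = (chunk_size * i)
--         end = (chunk_size * i) + chunk_size
--
--         if i == chunk_count - 1 and store_size % chunk_count:
--             end += store_size % chunk_count
--
--         stores_chunks.append((start, end))
--
--     return stores_chunks
-- ===== SOURCE B (Python) =====
-- def get_chunk_indexes(store_size, positions):
--     chunk_count = len(positions)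
--     chunk_size = int(store_size / chunk_count)
--     boundaries = [chunk_size * i for i in range(chunk_count + 1)]
--     boundaries[-1] += store_size % chunk_count
--     return list(zip(boundaries[:-1], boundaries[1:]))
-- ===== Notes on version B (the rewrite author's own statement) =====
-- stated objective: simpler
-- what changed: B computes the boundary table [chunk_size*i for i in range(chunk_count+1)], adds the remainder to the last boundary, and pairs adjacent boundaries with zip, replacing A's per-chunk compute-and-append loop with its last-iteration remainder branch.
-- outside the precondition, e.g. on get_chunk_indexes(10, []): A raises ZeroDivisionError, B raises ZeroDivisionError
import Mathlib
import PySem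

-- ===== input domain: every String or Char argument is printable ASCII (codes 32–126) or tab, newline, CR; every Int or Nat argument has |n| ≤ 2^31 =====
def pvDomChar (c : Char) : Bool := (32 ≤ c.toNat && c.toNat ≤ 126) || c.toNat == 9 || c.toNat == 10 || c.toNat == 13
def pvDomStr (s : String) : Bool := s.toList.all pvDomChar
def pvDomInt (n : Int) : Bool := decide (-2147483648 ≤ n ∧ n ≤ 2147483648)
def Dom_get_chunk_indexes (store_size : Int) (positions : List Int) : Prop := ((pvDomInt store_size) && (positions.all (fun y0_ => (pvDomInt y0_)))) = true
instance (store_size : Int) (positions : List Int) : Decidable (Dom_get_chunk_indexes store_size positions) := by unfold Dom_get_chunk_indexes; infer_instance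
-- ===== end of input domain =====

-- B builds the chunk boundary table once and pairs adjacent boundaries (zip), instead of A's
-- per-chunk compute-and-append loop with a last-iteration remainder branch; objective: simpler.

-- ===== PORT A =====
-- int(store_size / chunk_count) truncates the true quotient toward zero: exact here since
-- |store_size| ≤ 2^31 < 2^52, so the float division rounds to a value with the same truncation;
-- ported as Int.tdiv (truncating division).
def get_chunk_indexes (store_size : Int) (positions : List Int) : List (Int × Int) :=
  let chunk_count : Int := positions.length
  let chunk_size : Int := store_size.tdiv chunk_count
  (PySem.List.pyRange 0 chunk_count 1).foldl (fun stores_chunks i =>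
    let start := chunk_size * i
    let e := chunk_size * i + chunk_size
    let e := if i = chunk_count - 1 ∧ PySem.Int.mod store_size chunk_count ≠ 0
             then e + PySem.Int.mod store_size chunk_count else e
    stores_chunks ++ [(start, e)]) []

-- ===== PORT B =====
def get_chunk_indexes_alt (store_size : Int) (positions : List Int) : List (Int × Int) :=
  let chunk_count : Int := positions.length
  let chunk_size : Int := store_size.tdiv chunk_count   -- same int(store_size / chunk_count), see comment above
  let boundaries := (PySem.List.pyRange 0 (chunk_count + 1) 1).map (fun i => chunk_size * i)
  -- boundaries[-1] += store_size % chunk_count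
  let boundaries := boundaries.dropLast ++ [boundaries.getLastD 0 + PySem.Int.mod store_size chunk_count]
  -- list(zip(boundaries[:-1], boundaries[1:]))
  boundaries.dropLast.zip boundaries.tail

-- ===== PRECONDITION & SPEC =====
-- Python A raises ZeroDivisionError when positions is empty; excluded.
def Pre_get_chunk_indexes (store_size : Int) (positions : List Int) : Prop := positions ≠ []
instance (store_size : Int) (positions : List Int) : Decidable (Pre_get_chunk_indexes store_size positions) := by unfold Pre_get_chunk_indexes; infer_instance
def pvWitness_get_chunk_indexes : Int × List Int := (7, [1, 2, 3])

def Spec_get_chunk_indexes (store_size : Int) (positions : List Int) (out : List (Int × Int)) : Prop := out = get_chunk_indexes_alt store_size positions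
instance (store_size : Int) (positions : List Int) (out : List (Int × Int)) : Decidable (Spec_get_chunk_indexes store_size positions out) := by unfold Spec_get_chunk_indexes; infer_instance

-- ===== CLAIM (what is proved, stated in full; the proofs are below) =====
def Claim_equal_get_chunk_indexes : Prop := ∀ (store_size : Int) (positions : List Int), Dom_get_chunk_indexes store_size positions → Pre_get_chunk_indexes store_size positions → Spec_get_chunk_indexes store_size positions (get_chunk_indexes store_size positions)

-- ===== LEMMAS AND PROOFS =====

-- A's loop 'acc.append(pair)' as a map
theorem foldl_append_singleton {α β : Type} (f : α → β) (l : List α) (init : List β) :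
    l.foldl (fun acc i => acc ++ [f i]) init = init ++ l.map f := by
  induction l generalizing init with
  | nil => simp
  | cons x xs ih => simp [List.foldl, ih, List.append_assoc]

-- the tail of a nonempty list with one element appended
theorem tail_append_singleton {α : Type} (l : List α) (a : α) (h : l ≠ []) :
    (l ++ [a]).tail = l.tail ++ [a] := by
  cases l with
  | nil => exact absurd rfl h
  | cons x xs => simp

-- core identity: the per-chunk pairs equal adjacent pairs of the boundary table
theorem chunk_pairs_eq_zip (cs r : Int) (n : Nat) (hn : 1 ≤ n) :
    (List.range n).map (fun k : Nat => ((cs * (k:Int),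
        if ((k:Int) = (n:Int) - 1 ∧ r ≠ 0) then cs * (k:Int) + cs + r else cs * (k:Int) + cs) : Int × Int))
    = ((List.range n).map (fun k : Nat => cs * (k:Int))).zip
        (((List.range n).map (fun k : Nat => cs * (k:Int))).tail ++ [cs * (n:Int) + r]) := by
  apply List.ext_getElem
  · simp; omega
  · intro k hk1 hk2
    have hkn : k < n := by simpa using hk1
    simp only [List.getElem_map, List.getElem_range, List.getElem_zip]
    refine Prod.ext rfl ?_
    dsimp only
    by_cases hc : k < n - 1
    · rw [List.getElem_append_left (by simp; omega)]
      rw [List.getElem_tail, List.getElem_map, List.getElem_range]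
      have : ¬ ((k:Int) = (n:Int) - 1 ∧ r ≠ 0) := by
        rintro ⟨h1, _⟩; omega
      rw [if_neg this]
      push_cast
      ring
    · have hk' : k = n - 1 := by omega
      rw [List.getElem_append_right (by simp [List.length_tail]; omega)]
      rw [List.getElem_singleton]
      by_cases hr : r = 0
      · rw [if_neg (by simp [hr])]
        subst hr hk'
        have h1 : ((n - 1 : Nat) : Int) = (n:Int) - 1 := by omega
        rw [h1]; ring
      · rw [if_pos ⟨by omega, hr⟩]
        subst hk'
        have h1 : ((n - 1 : Nat) : Int) = (n:Int) - 1 := by omega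
        rw [h1]; ring

-- ===== VERDICT (by name: the statement is the Claim_ definition above) =====
theorem get_chunk_indexes_spec : Claim_equal_get_chunk_indexes := by
  intro store_size positions _ hpre
  have hn : 1 ≤ positions.length := List.length_pos_iff.mpr hpre
  unfold Spec_get_chunk_indexes
  simp only [get_chunk_indexes, get_chunk_indexes_alt]
  rw [foldl_append_singleton]
  rw [PySem.List.pyRange_one_succ_right (Int.natCast_nonneg positions.length)]
  simp only [List.map_append, List.map_singleton, List.dropLast_concat, List.getLastD_concat]
  rw [tail_append_singleton _ _ (by
    refine List.length_pos_iff.mp ?_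
    simp [PySem.List.pyRange_zero_natCast]
    omega)]
  simp only [PySem.List.pyRange_zero_natCast, List.map_map, Function.comp_def, List.nil_append]
  rw [chunk_pairs_eq_zip _ _ _ hn]
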